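-- pv_equiv track=rewrite | github.com/Kasiet2001/leetcode | split_a_string_into_the_max_num_of_unique_substrs.py | backtrack
-- ===== SOURCE A (Python) =====
-- def backtrack(s, start, seen):
--     if len(s) == start:
--         return 0
--
--     max_count = 0
--     for end in range(start + 1, len(s) + 1):
--         sub_string = s[start: end]
--         if sub_string not in seen:
--             seen.add(sub_string)
--             max_count = max(max_count, 1 + backtrack(s, end, seen))
--             seen.remove(sub_string)
--     return max_count
-- ===== SOURCE B (Python) =====
-- def backtrack(s, start, seen):
--     # Breadth-first worklist over search states (position, pieces-used-so-far, depth)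
--     # instead of A's recursive backtracking: a state spawns a successor for every
--     # next piece that is distinct from the pieces already used and absent from
--     # `seen`; the answer is the deepest state ever reached.  `seen` is not mutated.
--     best = 0
--     queue = [(start, frozenset(), 0)]
--     while queue:
--         pos, used, depth = queue.pop(0)
--         best = max(best, depth)
--         for end in range(pos + 1, len(s) + 1):
--             piece = s[pos:end]
--             if piece not in seen and piece not in used:
--                 queue.append((end, used | {piece}, depth + 1))
--     return best
-- ===== Notes on version B (the rewrite author's own statement) =====
-- stated objective: alternative
-- what changed: Replaces A's recursive backtracking DFS (which temporarily mutates the shared seen set and undoes each choice) by an iterative breadth-first worklist of search states (position, immutable set of pieces used so far, depth): each popped state spawns a successor per admissible next piece and the answer is the deepest state ever reached; seen is never mutated.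
import Mathlib
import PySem

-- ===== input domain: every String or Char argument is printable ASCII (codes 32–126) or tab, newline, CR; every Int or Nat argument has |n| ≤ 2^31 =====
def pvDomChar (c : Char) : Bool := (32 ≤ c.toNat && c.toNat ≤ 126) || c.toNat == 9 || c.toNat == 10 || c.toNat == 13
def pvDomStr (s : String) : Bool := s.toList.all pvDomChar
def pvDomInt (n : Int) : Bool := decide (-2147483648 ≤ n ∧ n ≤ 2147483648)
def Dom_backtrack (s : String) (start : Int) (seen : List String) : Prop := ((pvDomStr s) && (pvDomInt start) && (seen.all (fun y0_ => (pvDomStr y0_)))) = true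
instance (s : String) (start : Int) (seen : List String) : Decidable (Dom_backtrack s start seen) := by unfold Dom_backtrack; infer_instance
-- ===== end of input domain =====

-- B replaces A's recursive backtracking DFS by an iterative breadth-first worklist over
-- search states (position, immutable set of pieces used, depth); objective: alternative
-- (a genuinely different algorithmic decomposition; no speed claim).
-- A mutates its `seen` argument in place during the search (add/remove, net restored on
-- normal return); B never mutates `seen`. The equivalence proved is about the RETURN value only.

-- ===== PORT A =====
-- fuel = number of remaining recursion levels; (len(s) - start + 1) levels always suffice,
-- since every recursive call strictly increases `start` and the loop is empty once start ≥ len(s).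
def backtrackFuel : Nat → String → Int → List String → Int
  | 0, _, _, _ => 0
  | f + 1, s, start, seen =>
    if PySem.Str.len s = start then 0
    else
      (PySem.List.pyRange (start + 1) (PySem.Str.len s + 1) 1).foldl
        (fun maxCount e =>
          if (PySem.Str.slice s (some start) (some e)) ∉ seen then
            max maxCount (1 + backtrackFuel f s e (PySem.Set.add seen (PySem.Str.slice s (some start) (some e))))
          else maxCount) 0

def backtrack (s : String) (start : Int) (seen : List String) : Int :=
  backtrackFuel (PySem.Str.len s - start + 1).toNat s start seen

-- ===== PORT B =====
-- Worklist entry: (position, set of pieces already used, depth).  pvMeasureB is the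
-- termination measure of the while-loop: a popped entry is replaced by strictly
-- lighter successor entries (each factorial weight drops), so the total sinks.
def pvMeasureB (s : String) (stack : List (Int × List String × Int)) : Nat :=
  (stack.map (fun e => Nat.factorial ((PySem.Str.len s - e.1).toNat + 2))).sum

lemma pvMeasureB_append (s : String) (l1 l2 : List (Int × List String × Int)) :
    pvMeasureB s (l1 ++ l2) = pvMeasureB s l1 + pvMeasureB s l2 := by
  unfold pvMeasureB; rw [List.map_append, List.sum_append]

-- the new entries spawned from position `pos` weigh together less than `pos`'s own weight
lemma pvMeasureB_news_le (s : String) (seen used : List String) (pos : Int) (depth : Int) :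
    ∀ (l : List Int), (∀ e ∈ l, pos < e ∧ e ≤ PySem.Str.len s) →
    ∀ acc : List (Int × List String × Int),
      pvMeasureB s (l.foldl
        (fun acc e =>
          if (PySem.Str.slice s (some pos) (some e)) ∉ seen ∧ (PySem.Str.slice s (some pos) (some e)) ∉ used then
            acc ++ [(e, PySem.Set.add used (PySem.Str.slice s (some pos) (some e)), depth + 1)]
          else acc) acc)
        ≤ pvMeasureB s acc + l.length * Nat.factorial ((PySem.Str.len s - pos).toNat + 1) := by
  intro l
  induction l with
  | nil => intro _ acc; simp [List.foldl]
  | cons e t ih =>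
    intro hmem acc
    simp only [List.foldl_cons, List.length_cons]
    have he := hmem e (List.mem_cons_self)
    have hstep : pvMeasureB s
        (if (PySem.Str.slice s (some pos) (some e)) ∉ seen ∧ (PySem.Str.slice s (some pos) (some e)) ∉ used then
          acc ++ [(e, PySem.Set.add used (PySem.Str.slice s (some pos) (some e)), depth + 1)]
        else acc)
        ≤ pvMeasureB s acc + Nat.factorial ((PySem.Str.len s - pos).toNat + 1) := by
      split
      · rw [pvMeasureB_append]
        have hw : Nat.factorial ((PySem.Str.len s - e).toNat + 2)
            ≤ Nat.factorial ((PySem.Str.len s - pos).toNat + 1) := by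
          apply Nat.factorial_le
          omega
        simp only [pvMeasureB, List.map_cons, List.map_nil, List.sum_cons, List.sum_nil]
        omega
      · omega
    calc pvMeasureB s (t.foldl _ _)
        ≤ pvMeasureB s (if (PySem.Str.slice s (some pos) (some e)) ∉ seen ∧ (PySem.Str.slice s (some pos) (some e)) ∉ used then
              acc ++ [(e, PySem.Set.add used (PySem.Str.slice s (some pos) (some e)), depth + 1)]
            else acc) + t.length * Nat.factorial ((PySem.Str.len s - pos).toNat + 1) :=
          ih (fun x hx => hmem x (List.mem_cons_of_mem _ hx)) _
      _ ≤ pvMeasureB s acc + (t.length + 1) * Nat.factorial ((PySem.Str.len s - pos).toNat + 1) := by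
          have := hstep
          nlinarith [Nat.factorial_pos ((PySem.Str.len s - pos).toNat + 1)]

lemma pvMeasureB_dec (s : String) (seen used : List String) (pos depth : Int)
    (rest : List (Int × List String × Int)) :
    pvMeasureB s (rest ++ (PySem.List.pyRange (pos + 1) (PySem.Str.len s + 1) 1).foldl
        (fun acc e =>
          if (PySem.Str.slice s (some pos) (some e)) ∉ seen ∧ (PySem.Str.slice s (some pos) (some e)) ∉ used then
            acc ++ [(e, PySem.Set.add used (PySem.Str.slice s (some pos) (some e)), depth + 1)]
          else acc) [])
      < pvMeasureB s ((pos, used, depth) :: rest) := by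
  rw [pvMeasureB_append]
  have hb := pvMeasureB_news_le s seen used pos depth
    (PySem.List.pyRange (pos + 1) (PySem.Str.len s + 1) 1)
    (fun e he => by
      have := (PySem.List.mem_pyRange_one).1 he
      omega) []
  have hlen : (PySem.List.pyRange (pos + 1) (PySem.Str.len s + 1) 1).length
      = (PySem.Str.len s - pos).toNat := by
    rw [PySem.List.length_pyRange_one]; omega
  rw [hlen, show pvMeasureB s ([] : List (Int × List String × Int)) = 0 from rfl, Nat.zero_add] at hb
  have hlt : (PySem.Str.len s - pos).toNat * Nat.factorial ((PySem.Str.len s - pos).toNat + 1)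
      < Nat.factorial ((PySem.Str.len s - pos).toNat + 2) := by
    have h : Nat.factorial ((PySem.Str.len s - pos).toNat + 2)
        = ((PySem.Str.len s - pos).toNat + 2) * Nat.factorial ((PySem.Str.len s - pos).toNat + 1) := rfl
    have hp : 0 < Nat.factorial ((PySem.Str.len s - pos).toNat + 1) := Nat.factorial_pos _
    rw [h]
    exact Nat.mul_lt_mul_of_lt_of_le (by omega) (le_refl _) hp
  have hhead : pvMeasureB s ((pos, used, depth) :: rest)
      = Nat.factorial ((PySem.Str.len s - pos).toNat + 2) + pvMeasureB s rest := by
    unfold pvMeasureB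
    simp only [List.map_cons, List.sum_cons]
  rw [hhead, Nat.add_comm (Nat.factorial ((PySem.Str.len s - pos).toNat + 2)) (pvMeasureB s rest)]
  exact Nat.add_lt_add_left (lt_of_le_of_lt hb hlt) (pvMeasureB s rest)

-- the while-loop of B: pop the front entry, record its depth, push its successors
def loopB (s : String) (seen : List String) : List (Int × List String × Int) → Int → Int
  | [], best => best
  | (pos, used, depth) :: rest, best =>
    loopB s seen
      (rest ++ (PySem.List.pyRange (pos + 1) (PySem.Str.len s + 1) 1).foldl
        (fun acc e =>
          if (PySem.Str.slice s (some pos) (some e)) ∉ seen ∧ (PySem.Str.slice s (some pos) (some e)) ∉ used then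
            acc ++ [(e, PySem.Set.add used (PySem.Str.slice s (some pos) (some e)), depth + 1)]
          else acc) [])
      (max best depth)
  termination_by stack _ => pvMeasureB s stack
  decreasing_by exact pvMeasureB_dec s seen used pos depth rest

def backtrack_alt (s : String) (start : Int) (seen : List String) : Int :=
  loopB s seen [(start, ([] : List String), 0)] 0

-- ===== PRECONDITION & SPEC =====
def Spec_backtrack (s : String) (start : Int) (seen : List String) (out : Int) : Prop := out = backtrack_alt s start seen
instance (s : String) (start : Int) (seen : List String) (out : Int) : Decidable (Spec_backtrack s start seen out) := by unfold Spec_backtrack; infer_instance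

-- ===== CLAIM (what is proved, stated in full; the proofs are below) =====
def Claim_equal_backtrack : Prop := ∀ (s : String) (start : Int) (seen : List String), Dom_backtrack s start seen → Spec_backtrack s start seen (backtrack s start seen)

-- ===== LEMMAS AND PROOFS =====

-- A's loop body, named for the proofs.
def pvAStep (f : Nat) (s : String) (lo : Int) (seen : List String) (maxCount : Int) (e : Int) : Int :=
  if (PySem.Str.slice s (some lo) (some e)) ∉ seen then
    max maxCount (1 + backtrackFuel f s e (PySem.Set.add seen (PySem.Str.slice s (some lo) (some e))))
  else maxCount

lemma backtrackFuel_succ (f : Nat) (s : String) (start : Int) (seen : List String) :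
    backtrackFuel (f + 1) s start seen =
      if PySem.Str.len s = start then 0
      else (PySem.List.pyRange (start + 1) (PySem.Str.len s + 1) 1).foldl (pvAStep f s start seen) 0 := rfl

-- generic facts about "running maximum" folds -----------------------------------------

lemma step_le {γ : Type} (P : γ → Prop) [DecidablePred P] (v : γ → Int) (b : Int) (e : γ) :
    b ≤ if P e then max b (v e) else b := by
  split
  · exact le_max_left _ _
  · exact le_refl _

lemma le_foldl_of_le {γ : Type} (f : Int → γ → Int) (hf : ∀ a e, a ≤ f a e) :
    ∀ (l : List γ) (a : Int), a ≤ l.foldl f a := by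
  intro l
  induction l with
  | nil => intro a; exact le_refl _
  | cons c t ih => intro a; exact le_trans (hf a c) (ih _)

lemma foldl_max_extract {γ : Type} (P : γ → Prop) [DecidablePred P] (v : γ → Int) :
    ∀ (l : List γ), (∀ e ∈ l, 0 ≤ v e) → ∀ (a : Int), 0 ≤ a →
      l.foldl (fun b e => if P e then max b (v e) else b) a
        = max a (l.foldl (fun b e => if P e then max b (v e) else b) 0) := by
  intro l
  induction l with
  | nil => intro _ a ha; simp [List.foldl]; omega
  | cons c t ih =>
    intro hv a ha
    have hv' : ∀ e ∈ t, 0 ≤ v e := fun e he => hv e (List.mem_cons_of_mem _ he)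
    simp only [List.foldl_cons]
    rw [ih hv' _ (le_trans ha (step_le P v a c)), ih hv' _ (step_le P v 0 c)]
    have hF : (0:Int) ≤ t.foldl (fun b e => if P e then max b (v e) else b) 0 :=
      le_foldl_of_le _ (step_le P v) t 0
    have hvc : 0 ≤ v c := hv c (List.mem_cons_self)
    by_cases hc : P c
    · rw [if_pos hc, if_pos hc]
      rw [max_eq_right hvc, ← max_assoc]
    · rw [if_neg hc, if_neg hc]
      rw [max_eq_right hF]

-- the GLEM: a "take one more piece" fold at depth d versus A's fold, shifted by d
lemma foldl_depth_shift {γ : Type} (P : γ → Prop) [DecidablePred P] (w : γ → Int)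
    (hw : ∀ e, 0 ≤ w e) (d : Int) (hd : 0 ≤ d) :
    ∀ (l : List γ) (a : Int), 0 ≤ a →
      max (d + a) (l.foldl (fun b e => if P e then max b (d + w e) else b) 0)
        = d + l.foldl (fun b e => if P e then max b (w e) else b) a := by
  intro l
  induction l with
  | nil => intro a ha; simp [List.foldl]; omega
  | cons c t ih =>
    intro a ha
    simp only [List.foldl_cons]
    have hvpos : ∀ e, 0 ≤ d + w e := fun e => by have := hw e; omega
    have hinit : 0 ≤ (if P c then max (0:Int) (d + w c) else 0) :=
      step_le P (fun e => d + w e) 0 c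
    rw [foldl_max_extract P (fun e => d + w e) t (fun e _ => hvpos e) _ hinit]
    by_cases hc : P c
    · rw [if_pos hc, if_pos hc]
      rw [max_eq_right (hvpos c)]
      rw [← ih (max a (w c)) (le_trans ha (le_max_left _ _))]
      have : d + max a (w c) = max (d + a) (d + w c) := (max_add_add_left d a (w c)).symm
      rw [this, ← max_assoc]
    · rw [if_neg hc, if_neg hc]
      rw [← ih a ha]
      have hF : (0:Int) ≤ t.foldl (fun b e => if P e then max b (d + w e) else b) 0 :=
        le_foldl_of_le _ (step_le P (fun e => d + w e)) t 0
      rw [max_eq_right hF]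

-- A-side facts --------------------------------------------------------------------------

lemma le_pvAStep (f : Nat) (s : String) (lo : Int) (seen : List String) (a e : Int) :
    a ≤ pvAStep f s lo seen a e := by
  unfold pvAStep; split
  · exact le_max_left _ _
  · exact le_refl _

lemma backtrackFuel_nonneg : ∀ (f : Nat) (s : String) (pos : Int) (u : List String),
    0 ≤ backtrackFuel f s pos u := by
  intro f s pos u
  cases f with
  | zero => exact le_refl 0
  | succ f =>
    rw [backtrackFuel_succ]
    split
    · exact le_refl 0
    · exact le_foldl_of_le _ (le_pvAStep f s pos u) _ 0

lemma backtrack_nonneg (s : String) (pos : Int) (u : List String) : 0 ≤ backtrack s pos u :=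
  backtrackFuel_nonneg _ s pos u

-- any sufficient fuel computes the canonical value
lemma backtrackFuel_canon : ∀ (f g : Nat) (s : String) (pos : Int) (u : List String),
    (PySem.Str.len s - pos + 1).toNat ≤ g → g ≤ f →
    backtrackFuel g s pos u = backtrackFuel ((PySem.Str.len s - pos + 1).toNat) s pos u := by
  intro f
  induction f with
  | zero =>
    intro g s pos u hg hgf
    have h1 : g = 0 := by omega
    have h2 : (PySem.Str.len s - pos + 1).toNat = 0 := by omega
    rw [h1, h2]
  | succ f ih =>
    intro g s pos u hg hgf
    cases g with
    | zero =>
      have h2 : (PySem.Str.len s - pos + 1).toNat = 0 := by omega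
      rw [h2]
    | succ g' =>
      by_cases hend : PySem.Str.len s = pos
      · have h1 : (PySem.Str.len s - pos + 1).toNat = 1 := by omega
        rw [h1, backtrackFuel_succ, backtrackFuel_succ, if_pos hend, if_pos hend]
      · by_cases hgt : PySem.Str.len s < pos
        · have h2 : (PySem.Str.len s - pos + 1).toNat = 0 := by omega
          rw [h2, backtrackFuel_succ, if_neg hend,
            PySem.List.pyRange_one_eq_nil (by omega)]
          rfl
        · have hlt : pos < PySem.Str.len s := by
            rcases lt_trichotomy pos (PySem.Str.len s) with h | h | h
            · exact h
            · exact absurd h.symm hend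
            · exact absurd h hgt
          set m := (PySem.Str.len s - pos).toNat with hm
          have h1 : (PySem.Str.len s - pos + 1).toNat = m + 1 := by omega
          rw [h1, backtrackFuel_succ, backtrackFuel_succ, if_neg hend, if_neg hend]
          apply PySem.List.foldl_congr_mem
          intro acc e he
          have hee := (PySem.List.mem_pyRange_one).1 he
          have hne : (PySem.Str.len s - e + 1).toNat ≤ m := by omega
          have hrec : backtrackFuel g' s e (PySem.Set.add u (PySem.Str.slice s (some pos) (some e)))
              = backtrackFuel m s e (PySem.Set.add u (PySem.Str.slice s (some pos) (some e))) := by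
            rw [ih g' s e _ (by omega) (by omega), ih m s e _ hne (by omega)]
          unfold pvAStep
          rw [hrec]
  
lemma backtrack_eq_fuel (s : String) (pos : Int) (u : List String) (g : Nat)
    (hg : (PySem.Str.len s - pos + 1).toNat ≤ g) :
    backtrackFuel g s pos u = backtrack s pos u :=
  backtrackFuel_canon g g s pos u hg (le_refl g)

-- A's value depends on its set only through membership
lemma backtrackFuel_congr_mem : ∀ (f : Nat) (s : String) (pos : Int) (u1 u2 : List String),
    (∀ x, x ∈ u1 ↔ x ∈ u2) → backtrackFuel f s pos u1 = backtrackFuel f s pos u2 := by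
  intro f
  induction f with
  | zero => intro _ _ _ _ _; rfl
  | succ f ih =>
    intro s pos u1 u2 h
    rw [backtrackFuel_succ, backtrackFuel_succ]
    by_cases hend : PySem.Str.len s = pos
    · rw [if_pos hend, if_pos hend]
    · rw [if_neg hend, if_neg hend]
      apply PySem.List.foldl_congr_mem
      intro acc e _
      unfold pvAStep
      by_cases hm : (PySem.Str.slice s (some pos) (some e)) ∈ u1
      · rw [if_neg (by simpa using hm), if_neg (by simpa using (h _).1 hm)]
      · rw [if_pos hm, if_pos (fun hc => hm ((h _).2 hc))]
        have : ∀ x, x ∈ PySem.Set.add u1 (PySem.Str.slice s (some pos) (some e))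
            ↔ x ∈ PySem.Set.add u2 (PySem.Str.slice s (some pos) (some e)) := by
          intro x
          rw [PySem.Set.mem_add, PySem.Set.mem_add, h x]
        rw [ih s e _ _ this]

-- A's recurrence in terms of `backtrack` itself
lemma backtrack_rec (s : String) (pos : Int) (u : List String) :
    backtrack s pos u =
      if PySem.Str.len s = pos then 0
      else (PySem.List.pyRange (pos + 1) (PySem.Str.len s + 1) 1).foldl
        (fun m e =>
          if (PySem.Str.slice s (some pos) (some e)) ∉ u then
            max m (1 + backtrack s e (PySem.Set.add u (PySem.Str.slice s (some pos) (some e))))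
          else m) 0 := by
  by_cases hend : PySem.Str.len s = pos
  · rw [if_pos hend]
    have h1 : (PySem.Str.len s - pos + 1).toNat = 1 := by omega
    unfold backtrack
    rw [h1, backtrackFuel_succ, if_pos hend]
  · rw [if_neg hend]
    by_cases hgt : PySem.Str.len s < pos
    · have h2 : (PySem.Str.len s - pos + 1).toNat = 0 := by omega
      unfold backtrack
      rw [h2, PySem.List.pyRange_one_eq_nil (by omega)]
      rfl
    · have hlt : pos < PySem.Str.len s := by
        rcases lt_trichotomy pos (PySem.Str.len s) with h | h | h
        · exact h
        · exact absurd h.symm hend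
        · exact absurd h hgt
      set m := (PySem.Str.len s - pos).toNat with hm
      have h1 : (PySem.Str.len s - pos + 1).toNat = m + 1 := by omega
      conv_lhs => rw [backtrack, h1]
      rw [backtrackFuel_succ, if_neg hend]
      apply PySem.List.foldl_congr_mem
      intro acc e he
      have hee := (PySem.List.mem_pyRange_one).1 he
      unfold pvAStep
      rw [backtrack_eq_fuel s e _ m (by omega)]

-- B-side invariant ----------------------------------------------------------------------

-- the exact value a worklist entry contributes to the final answer
def pvVal (s : String) (seen : List String) (e : Int × List String × Int) : Int :=
  e.2.2 + backtrack s e.1 (PySem.Set.update seen e.2.1)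

lemma pvVal_nonneg (s : String) (seen : List String) (e : Int × List String × Int)
    (h : 0 ≤ e.2.2) : 0 ≤ pvVal s seen e := by
  unfold pvVal
  have := backtrack_nonneg s e.1 (PySem.Set.update seen e.2.1)
  omega

-- the new entries of a popped entry, as filter-then-map over the candidate ends
lemma news_eq_filter_map (s : String) (seen used : List String) (pos depth : Int) :
    (PySem.List.pyRange (pos + 1) (PySem.Str.len s + 1) 1).foldl
        (fun acc e =>
          if (PySem.Str.slice s (some pos) (some e)) ∉ seen ∧ (PySem.Str.slice s (some pos) (some e)) ∉ used then
            acc ++ [(e, PySem.Set.add used (PySem.Str.slice s (some pos) (some e)), depth + 1)]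
          else acc) []
      = (((PySem.List.pyRange (pos + 1) (PySem.Str.len s + 1) 1).filter
            (fun e => decide ((PySem.Str.slice s (some pos) (some e)) ∉ seen ∧ (PySem.Str.slice s (some pos) (some e)) ∉ used))).map
          (fun e => (e, PySem.Set.add used (PySem.Str.slice s (some pos) (some e)), depth + 1))) := by
  have hfun : (fun (acc : List (Int × List String × Int)) (e : Int) =>
        if (PySem.Str.slice s (some pos) (some e)) ∉ seen ∧ (PySem.Str.slice s (some pos) (some e)) ∉ used then
          acc ++ [(e, PySem.Set.add used (PySem.Str.slice s (some pos) (some e)), depth + 1)]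
        else acc)
      = (fun acc e =>
        if (fun e => decide ((PySem.Str.slice s (some pos) (some e)) ∉ seen ∧ (PySem.Str.slice s (some pos) (some e)) ∉ used)) e = true then
          acc ++ [(fun e => (e, PySem.Set.add used (PySem.Str.slice s (some pos) (some e)), depth + 1)) e]
        else acc) := by
    funext acc e
    simp
  rw [hfun, PySem.List.foldl_append_if]
  simp

-- KEY equation: the popped entry's own depth versus its successors reproduces A's recurrence
lemma key_eq (s : String) (seen used : List String) (pos depth : Int) (hd : 0 ≤ depth) :
    max depth
      (((PySem.List.pyRange (pos + 1) (PySem.Str.len s + 1) 1).foldl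
        (fun acc e =>
          if (PySem.Str.slice s (some pos) (some e)) ∉ seen ∧ (PySem.Str.slice s (some pos) (some e)) ∉ used then
            acc ++ [(e, PySem.Set.add used (PySem.Str.slice s (some pos) (some e)), depth + 1)]
          else acc) []).foldl (fun b e => max b (pvVal s seen e)) 0)
      = depth + backtrack s pos (PySem.Set.update seen used) := by
  rw [news_eq_filter_map]
  rw [List.foldl_map, List.foldl_filter]
  rw [backtrack_rec s pos (PySem.Set.update seen used)]
  by_cases hend : PySem.Str.len s = pos
  · rw [if_pos hend, PySem.List.pyRange_one_eq_nil (by omega)]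
    simp only [List.foldl_nil, add_zero]
    exact max_eq_left hd
  · rw [if_neg hend]
    have hcond : ∀ e : Int,
        (decide ((PySem.Str.slice s (some pos) (some e)) ∉ seen ∧ (PySem.Str.slice s (some pos) (some e)) ∉ used) = true)
          ↔ (PySem.Str.slice s (some pos) (some e)) ∉ PySem.Set.update seen used := by
      intro e
      rw [decide_eq_true_eq, PySem.Set.mem_update]
      tauto
    have hval : ∀ e : Int,
        pvVal s seen (e, PySem.Set.add used (PySem.Str.slice s (some pos) (some e)), depth + 1)
          = depth + (1 + backtrack s e (PySem.Set.add (PySem.Set.update seen used) (PySem.Str.slice s (some pos) (some e)))) := by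
      intro e
      unfold pvVal
      have hsets : ∀ x, x ∈ PySem.Set.update seen (PySem.Set.add used (PySem.Str.slice s (some pos) (some e)))
          ↔ x ∈ PySem.Set.add (PySem.Set.update seen used) (PySem.Str.slice s (some pos) (some e)) := by
        intro x
        rw [PySem.Set.mem_update, PySem.Set.mem_add, PySem.Set.mem_add, PySem.Set.mem_update]
        tauto
      have := backtrackFuel_congr_mem ((PySem.Str.len s - e + 1).toNat) s e _ _ hsets
      unfold backtrack
      simp only [this]
      ring
    have hstep : ((PySem.List.pyRange (pos + 1) (PySem.Str.len s + 1) 1).foldl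
        (fun b e =>
          if decide ((PySem.Str.slice s (some pos) (some e)) ∉ seen ∧ (PySem.Str.slice s (some pos) (some e)) ∉ used) = true then
            max b (pvVal s seen (e, PySem.Set.add used (PySem.Str.slice s (some pos) (some e)), depth + 1))
          else b) 0)
        = ((PySem.List.pyRange (pos + 1) (PySem.Str.len s + 1) 1).foldl
        (fun b e =>
          if (PySem.Str.slice s (some pos) (some e)) ∉ PySem.Set.update seen used then
            max b (depth + (1 + backtrack s e (PySem.Set.add (PySem.Set.update seen used) (PySem.Str.slice s (some pos) (some e)))))
          else b) 0) := by
      apply PySem.List.foldl_congr_mem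
      intro acc e _
      by_cases hc : (PySem.Str.slice s (some pos) (some e)) ∉ PySem.Set.update seen used
      · rw [if_pos ((hcond e).2 hc), if_pos hc, hval e]
      · rw [if_neg (fun hh => hc ((hcond e).1 hh)), if_neg hc]
    rw [hstep]
    have := foldl_depth_shift
      (fun e => (PySem.Str.slice s (some pos) (some e)) ∉ PySem.Set.update seen used)
      (fun e => 1 + backtrack s e (PySem.Set.add (PySem.Set.update seen used) (PySem.Str.slice s (some pos) (some e))))
      (fun e => by
        show (0:Int) ≤ 1 + backtrack s e (PySem.Set.add (PySem.Set.update seen used) (PySem.Str.slice s (some pos) (some e)))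
        have := backtrack_nonneg s e (PySem.Set.add (PySem.Set.update seen used) (PySem.Str.slice s (some pos) (some e)))
        omega)
      depth hd
      (PySem.List.pyRange (pos + 1) (PySem.Str.len s + 1) 1) 0 (le_refl 0)
    rw [add_zero] at this
    exact this

lemma loopB_invariant (s : String) (seen : List String) :
    ∀ (n : Nat) (stack : List (Int × List String × Int)) (best : Int),
      pvMeasureB s stack = n → (∀ e ∈ stack, 0 ≤ e.2.2) → 0 ≤ best →
      loopB s seen stack best = stack.foldl (fun b e => max b (pvVal s seen e)) best := by
  intro n
  induction n using Nat.strong_induction_on with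
  | _ n ih =>
    intro stack best hn hpos hbest
    match stack with
    | [] => simp [loopB]
    | (pos, used, depth) :: rest =>
      rw [loopB]
      have hdep : 0 ≤ depth := hpos _ (List.mem_cons_self)
      set news := (PySem.List.pyRange (pos + 1) (PySem.Str.len s + 1) 1).foldl
        (fun acc e =>
          if (PySem.Str.slice s (some pos) (some e)) ∉ seen ∧ (PySem.Str.slice s (some pos) (some e)) ∉ used then
            acc ++ [(e, PySem.Set.add used (PySem.Str.slice s (some pos) (some e)), depth + 1)]
          else acc) [] with hnews
      have hdec : pvMeasureB s (rest ++ news) < n := by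
        rw [← hn, hnews]
        exact pvMeasureB_dec s seen used pos depth rest
      have hposnews : ∀ e ∈ news, 0 ≤ e.2.2 := by
        intro e he
        rw [hnews, news_eq_filter_map] at he
        rcases List.mem_map.1 he with ⟨x, _, rfl⟩
        show (0:Int) ≤ depth + 1
        omega
      have hpos' : ∀ e ∈ rest ++ news, 0 ≤ e.2.2 := by
        intro e he
        rcases List.mem_append.1 he with h | h
        · exact hpos e (List.mem_cons_of_mem _ h)
        · exact hposnews e h
      rw [ih _ hdec (rest ++ news) (max best depth) rfl hpos' (le_trans hbest (le_max_left _ _))]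
      -- both sides are maxima of the same contributions
      have hposrest : ∀ e ∈ rest, 0 ≤ pvVal s seen e :=
        fun e he => pvVal_nonneg s seen e (hpos e (List.mem_cons_of_mem _ he))
      have hposnews' : ∀ e ∈ news, 0 ≤ pvVal s seen e :=
        fun e he => pvVal_nonneg s seen e (hposnews e he)
      have extract : ∀ (l : List (Int × List String × Int)), (∀ e ∈ l, 0 ≤ pvVal s seen e) →
          ∀ a : Int, 0 ≤ a →
          l.foldl (fun b e => max b (pvVal s seen e)) a
            = max a (l.foldl (fun b e => max b (pvVal s seen e)) 0) := by
        intro l hl a ha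
        have h := foldl_max_extract (fun _ => True) (pvVal s seen) l hl a ha
        simpa using h
      rw [List.foldl_append, List.foldl_cons]
      have hR0 : (0:Int) ≤ rest.foldl (fun b e => max b (pvVal s seen e)) 0 :=
        le_foldl_of_le _ (fun a e => le_max_left _ _) rest 0
      rw [extract news hposnews' _ (le_trans (le_trans hbest (le_max_left best depth)) (le_foldl_of_le _ (fun a e => le_max_left _ _) rest _))]
      rw [extract rest hposrest (max best depth) (le_trans hbest (le_max_left _ _))]
      rw [extract rest hposrest (max best (pvVal s seen (pos, used, depth))) (le_trans hbest (le_max_left _ _))]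
      have hkey : pvVal s seen (pos, used, depth)
          = max depth (news.foldl (fun b e => max b (pvVal s seen e)) 0) := by
        show depth + backtrack s pos (PySem.Set.update seen used) = _
        rw [hnews]
        exact (key_eq s seen used pos depth hdep).symm
      rw [hkey]
      ac_rfl

-- ===== VERDICT (by name: the statement is the Claim_ definition above) =====
theorem backtrack_spec : Claim_equal_backtrack := by
  intro s start seen _hdom
  unfold Spec_backtrack
  unfold backtrack_alt
  rw [loopB_invariant s seen (pvMeasureB s [(start, ([] : List String), 0)]) _ 0 rfl
    (by intro e he; simp only [List.mem_singleton] at he; subst he; exact le_refl 0) (le_refl 0)]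
  simp only [List.foldl_cons, List.foldl_nil]
  unfold pvVal
  have hupd : PySem.Set.update seen ([] : List String) = seen := rfl
  simp only [hupd]
  have := backtrack_nonneg s start seen
  omega
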